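-- pv_equiv track=rewrite | github.com/HiThink-Research/GAGE | src/gage_eval/assets/datasets/utils/mapping.py | _token_split
-- ===== SOURCE A (Python) =====
-- from typing import Any, Dict, List, Optional, Sequence, Tuple
--
-- def _token_split(text: str) -> List[str]:
--     out: List[str] = []
--     current = ""
--     for ch in text:
--         if ch.isalpha():
--             current += ch
--         else:
--             if current:
--                 out.append(current)
--                 current = ""
--     if current:
--         out.append(current)
--     return out
-- ===== SOURCE B (Python) =====
-- def _token_split(text):
--     out = []
--     i, n = 0, len(text)
--     while i < n:
--         if text[i].isalpha():
--             j = i + 1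
--             while j < n and text[j].isalpha():
--                 j += 1
--             out.append(text[i:j])
--             i = j
--         else:
--             i += 1
--     return out
-- ===== Notes on version B (the rewrite author's own statement) =====
-- stated objective: alternative
-- what changed: B scans the string by index, extracting each maximal alphabetic run as a single slice, instead of A's per-character accumulator with an end-of-string flush.
import Mathlib
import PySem

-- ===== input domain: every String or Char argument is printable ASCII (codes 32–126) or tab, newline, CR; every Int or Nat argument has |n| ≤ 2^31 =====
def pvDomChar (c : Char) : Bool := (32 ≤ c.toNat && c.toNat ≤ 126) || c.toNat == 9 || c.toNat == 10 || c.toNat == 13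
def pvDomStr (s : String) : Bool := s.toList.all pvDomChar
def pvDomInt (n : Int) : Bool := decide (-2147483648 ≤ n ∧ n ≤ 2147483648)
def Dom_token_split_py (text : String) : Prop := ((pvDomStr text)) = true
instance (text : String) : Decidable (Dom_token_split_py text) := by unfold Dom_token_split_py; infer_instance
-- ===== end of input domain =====

-- B replaces A's per-character accumulator + flush by an index scan that slices out each maximal alphabetic run (alternative decomposition, same cost).


-- ===== PORT A =====
-- one loop step: grow `current` on an alphabetic char, otherwise flush it if nonempty
def stepA (s : List String × List Char) (ch : Char) : List String × List Char :=
  if PySem.Chars.isalpha ch then (s.1, s.2 ++ [ch])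
  else if s.2.isEmpty then s else (s.1 ++ [String.mk s.2], [])

-- the final `if current: out.append(current)`
def flushA (st : List String × List Char) : List String :=
  if st.2.isEmpty then st.1 else st.1 ++ [String.mk st.2]

def token_split_py (text : String) : List String :=
  flushA (text.toList.foldl stepA ([], []))

-- ===== PORT B =====
-- B's outer while-loop: at an alphabetic char, the inner while-loop finds the end of the
-- run (= takeWhile) and slices it out, resuming after it (= dropWhile); else skip one char.
def tokenRuns : List Char → List String
  | [] => []
  | c :: rest =>
    if PySem.Chars.isalpha c then
      String.mk (c :: rest.takeWhile PySem.Chars.isalpha)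
        :: tokenRuns (rest.dropWhile PySem.Chars.isalpha)
    else tokenRuns rest
termination_by l => l.length
decreasing_by
  · exact Nat.lt_succ_of_le (List.length_dropWhile_le _ _)
  · simp

def token_split_py_alt (text : String) : List String := tokenRuns text.toList

-- ===== PRECONDITION & SPEC =====
def Spec_token_split_py (text : String) (out : List String) : Prop := out = token_split_py_alt text
instance (text : String) (out : List String) : Decidable (Spec_token_split_py text out) := by unfold Spec_token_split_py; infer_instance

-- ===== CLAIM (what is proved, stated in full; the proofs are below) =====
def Claim_equal_token_split_py : Prop := ∀ (text : String), Dom_token_split_py text → Spec_token_split_py text (token_split_py text)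

-- ===== LEMMAS AND PROOFS =====

-- proof-only intermediate: A's loop read as structural recursion carrying `current`
def chop (cur : List Char) : List Char → List String
  | [] => if cur.isEmpty then [] else [String.mk cur]
  | c :: rest =>
    if PySem.Chars.isalpha c then chop (cur ++ [c]) rest
    else (if cur.isEmpty then [] else [String.mk cur]) ++ chop [] rest

theorem foldA_chop (l : List Char) : ∀ (out : List String) (cur : List Char),
    flushA (l.foldl stepA (out, cur)) = out ++ chop cur l := by
  induction l with
  | nil =>
    intro out cur
    by_cases h : cur.isEmpty <;> simp [flushA, chop, h]
  | cons c rest ih =>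
    intro out cur
    by_cases h : PySem.Chars.isalpha c
    · simp only [List.foldl_cons, stepA, h, if_true, chop, ih]
    · by_cases hc : cur.isEmpty
      · have : cur = [] := List.isEmpty_iff.mp hc
        subst this
        simp [stepA, h, chop, ih]
      · simp [stepA, h, hc, chop, ih]
  
theorem chop_run (l : List Char) : ∀ (cur : List Char), cur.isEmpty = false →
    chop cur l = String.mk (cur ++ l.takeWhile PySem.Chars.isalpha)
      :: chop [] (l.dropWhile PySem.Chars.isalpha) := by
  induction l with
  | nil => intro cur hc; simp [chop, hc]
  | cons c rest ih =>
    intro cur hc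
    by_cases h : PySem.Chars.isalpha c
    · have hne : (cur ++ [c]).isEmpty = false := by simp
      simp [chop, h, ih _ hne]
    · simp [chop, h, hc]

theorem chop_eq_tokenRuns (l : List Char) : chop [] l = tokenRuns l := by
  induction l using tokenRuns.induct with
  | case1 => simp [chop, tokenRuns]
  | case2 c rest h ih =>
    have hne : (([] : List Char) ++ [c]).isEmpty = false := by simp
    rw [tokenRuns, if_pos h, chop, if_pos h, chop_run _ _ hne, ih]; simp
  | case3 c rest h ih =>
    rw [tokenRuns, if_neg h, chop, if_neg h]
    simpa using ih

-- ===== VERDICT (by name: the statement is the Claim_ definition above) =====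
theorem token_split_py_spec : Claim_equal_token_split_py := by
  intro text _
  unfold Spec_token_split_py token_split_py token_split_py_alt
  rw [foldA_chop, chop_eq_tokenRuns]
  simp
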